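-- pv_equiv track=rewrite | github.com/n00tropic/n00tropic-cerebrum | .dev/automation/scripts/wait-for-checks.py | summarize_check_runs
-- ===== SOURCE A (Python) =====
-- from typing import Dict, List, Optional, Tuple
--
-- def summarize_check_runs(
--     check_runs: List[Dict[str, str]],
-- ) -> Tuple[int, int, int, List[Tuple[str, str, str]]]:
--     total = len(check_runs)
--     completed = 0
--     success = 0
--     details = []
--     for c in check_runs:
--         name = c.get("name", "<unnamed>")
--         status = c.get("status")
--         conclusion = c.get("conclusion")
--         details.append((name, status or "", conclusion or ""))
--         if status == "completed":
--             completed += 1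
--             if conclusion == "success":
--                 success += 1
--     return total, completed, success, details
-- ===== SOURCE B (Python) =====
-- def summarize_check_runs(check_runs):
--     details = [
--         (c.get("name", "<unnamed>"), c.get("status") or "", c.get("conclusion") or "")
--         for c in check_runs
--     ]
--     completed = sum(1 for _, s, _ in details if s == "completed")
--     success = sum(1 for _, s, conc in details if s == "completed" and conc == "success")
--     return len(check_runs), completed, success, details
-- ===== Notes on version B (the rewrite author's own statement) =====
-- stated objective: alternative
-- what changed: Replaces A's single fused loop carrying three mutable accumulators with a map that builds the details list first, then derives both counters by scanning the built list, using the fact that (status or '') == 'completed' iff status == 'completed'.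
import Mathlib
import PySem

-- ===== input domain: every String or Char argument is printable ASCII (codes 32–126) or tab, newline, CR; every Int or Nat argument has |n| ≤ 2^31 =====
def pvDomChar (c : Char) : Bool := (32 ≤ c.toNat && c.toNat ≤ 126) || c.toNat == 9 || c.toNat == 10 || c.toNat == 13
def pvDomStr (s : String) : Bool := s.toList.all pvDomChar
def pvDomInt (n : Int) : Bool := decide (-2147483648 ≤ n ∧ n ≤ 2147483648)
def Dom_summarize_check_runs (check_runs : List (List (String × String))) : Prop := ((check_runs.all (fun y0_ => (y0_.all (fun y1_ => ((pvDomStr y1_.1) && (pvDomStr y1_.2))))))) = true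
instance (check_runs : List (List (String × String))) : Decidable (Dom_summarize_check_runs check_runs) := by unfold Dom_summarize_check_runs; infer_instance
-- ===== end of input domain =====

-- B builds the details list first with a map and derives both counters from it; same O(n) cost, different decomposition.

-- ===== PORT A =====
-- dict.get(k) on an association list: first match (Python dict keys are unique; first match is exact)
def pvDictGet? (c : List (String × String)) (k : String) : Option String :=
  List.lookup k c

-- A's loop body: one iteration of the for-loop over (completed, success, details)
def pvStepA (st : Int × Int × List (String × String × String)) (c : List (String × String)) :
    Int × Int × List (String × String × String) :=
  let name := (pvDictGet? c "name").getD "<unnamed>"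
  let status := pvDictGet? c "status"
  let conclusion := pvDictGet? c "conclusion"
  -- 'status or ""' / 'conclusion or ""': none → "", some s → s (exact: '' or '' = '')
  let details := st.2.2 ++ [(name, status.getD "", conclusion.getD "")]
  if status = some "completed" then
    if conclusion = some "success" then (st.1 + 1, st.2.1 + 1, details)
    else (st.1 + 1, st.2.1, details)
  else (st.1, st.2.1, details)

-- A: one loop over check_runs threading (completed, success, details)
def summarize_check_runs (check_runs : List (List (String × String))) : Int × Int × Int × (List (String × String × String)) :=
  let total : Int := check_runs.length
  let st := check_runs.foldl pvStepA (0, 0, [])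
  (total, st.1, st.2.1, st.2.2)

-- ===== PORT B =====
def summarize_check_runs_alt (check_runs : List (List (String × String))) : Int × Int × Int × (List (String × String × String)) :=
  let details := check_runs.map (fun c =>
    ((List.lookup "name" c).getD "<unnamed>",
     (List.lookup "status" c).getD "",
     (List.lookup "conclusion" c).getD ""))
  let completed : Int := (details.countP (fun d => d.2.1 == "completed") : Nat)
  let success : Int := (details.countP (fun d => d.2.1 == "completed" && d.2.2 == "success") : Nat)
  ((check_runs.length : Int), completed, success, details)

-- ===== PRECONDITION & SPEC =====
def Spec_summarize_check_runs (check_runs : List (List (String × String))) (out : Int × Int × Int × (List (String × String × String))) : Prop := out = summarize_check_runs_alt check_runs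
instance (check_runs : List (List (String × String))) (out : Int × Int × Int × (List (String × String × String))) : Decidable (Spec_summarize_check_runs check_runs out) := by unfold Spec_summarize_check_runs; infer_instance

-- ===== CLAIM (what is proved, stated in full; the proofs are below) =====
def Claim_equal_summarize_check_runs : Prop := ∀ (check_runs : List (List (String × String))), Dom_summarize_check_runs check_runs → Spec_summarize_check_runs check_runs (summarize_check_runs check_runs)

-- ===== LEMMAS AND PROOFS =====

-- B's per-row projection
def pvRow (c : List (String × String)) : String × String × String :=
  ((List.lookup "name" c).getD "<unnamed>",
   (List.lookup "status" c).getD "",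
   (List.lookup "conclusion" c).getD "")

theorem pvFoldl_char (check_runs : List (List (String × String)))
    (comp succ : Int) (det : List (String × String × String)) :
    check_runs.foldl pvStepA (comp, succ, det)
    = (comp + ((check_runs.countP (fun c => (pvRow c).2.1 == "completed")) : Int),
       succ + ((check_runs.countP (fun c => (pvRow c).2.1 == "completed" && (pvRow c).2.2 == "success")) : Int),
       det ++ check_runs.map pvRow) := by
  induction check_runs generalizing comp succ det with
  | nil => simp
  | cons c cs ih =>
    rw [List.foldl_cons]
    by_cases hs : pvDictGet? c "status" = some "completed"
    · have hsL : List.lookup "status" c = some "completed" := hs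
      by_cases hc : pvDictGet? c "conclusion" = some "success"
      · have hcL : List.lookup "conclusion" c = some "success" := hc
        have hstep : pvStepA (comp, succ, det) c = (comp + 1, succ + 1, det ++ [pvRow c]) := by
          simp [pvStepA, pvRow, pvDictGet?, hsL, hcL]
        rw [hstep, ih]
        simp [pvRow, hsL, hcL]
        exact ⟨by ring, by ring⟩
      · have hcL : ¬ (List.lookup "conclusion" c).getD "" = "success" := by
          cases h : List.lookup "conclusion" c <;> simp_all [pvDictGet?]
        have hcN : ¬ List.lookup "conclusion" c = some "success" := hc
        have hstep : pvStepA (comp, succ, det) c = (comp + 1, succ, det ++ [pvRow c]) := by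
          simp [pvStepA, pvRow, pvDictGet?, hsL, hcN]
        rw [hstep, ih]
        simp [pvRow, hsL, hcL]
        exact by ring
    · have hsL : ¬ (List.lookup "status" c).getD "" = "completed" := by
        cases h : List.lookup "status" c <;> simp_all [pvDictGet?]
      have hsN : ¬ List.lookup "status" c = some "completed" := hs
      have hstep : pvStepA (comp, succ, det) c = (comp, succ, det ++ [pvRow c]) := by
        simp [pvStepA, pvRow, pvDictGet?, hsN]
      rw [hstep, ih]
      simp [pvRow, hsL]

theorem summarize_check_runs_spec : Claim_equal_summarize_check_runs := by
  intro check_runs _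
  unfold Spec_summarize_check_runs summarize_check_runs summarize_check_runs_alt
  simp only [pvFoldl_char]
  simp [pvRow, Function.comp_def]
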